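-- pv_equiv track=rewrite | github.com/factoryofthesun/IVaps | mlisne/qps_old.py | _get_og_order
-- ===== SOURCE A (Python) =====
-- def _get_og_order(n, C, D):
--     order = None
--     if C is None and D is None:
--         pass
--     elif C is None:
--         order = []
--         c_len = n - len(D)
--         c_ind = 0
--         for i in range(n):
--             if i in D:
--                 order.append(c_ind + c_len)
--                 c_ind += 1
--             else:
--                 order.append(i - c_ind)
--     else:
--         order = []
--         c_len = len(C)
--         c_ind = 0
--         for i in range(n):
--             if i in C:
--                 order.append(i - c_ind)
--             else:
--                 order.append(c_ind + c_len)
--                 c_ind += 1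
--     return order
-- ===== SOURCE B (Python) =====
-- def _scatter(order, idxs, off):
--     for rank, i in enumerate(idxs):
--         order[i] = off + rank
--
-- def _get_og_order(n, C, D):
--     if C is None and D is None:
--         return None
--     if C is None:
--         c_len = n - len(D)
--         in_front = lambda i: i not in D
--     else:
--         c_len = len(C)
--         in_front = lambda i: i in C
--     members, nonmembers = [], []
--     for i in range(n):
--         (members if in_front(i) else nonmembers).append(i)
--     order = [0] * n
--     _scatter(order, members, 0)
--     _scatter(order, nonmembers, c_len)
--     return order
-- ===== Notes on version B (the rewrite author's own statement) =====
-- stated objective: alternative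
-- what changed: Replaces A's single pass that appends positions while tracking a running non-member counter by first partitioning range(n) into member/non-member index lists and then scattering ranks into a preallocated array.
import Mathlib
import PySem

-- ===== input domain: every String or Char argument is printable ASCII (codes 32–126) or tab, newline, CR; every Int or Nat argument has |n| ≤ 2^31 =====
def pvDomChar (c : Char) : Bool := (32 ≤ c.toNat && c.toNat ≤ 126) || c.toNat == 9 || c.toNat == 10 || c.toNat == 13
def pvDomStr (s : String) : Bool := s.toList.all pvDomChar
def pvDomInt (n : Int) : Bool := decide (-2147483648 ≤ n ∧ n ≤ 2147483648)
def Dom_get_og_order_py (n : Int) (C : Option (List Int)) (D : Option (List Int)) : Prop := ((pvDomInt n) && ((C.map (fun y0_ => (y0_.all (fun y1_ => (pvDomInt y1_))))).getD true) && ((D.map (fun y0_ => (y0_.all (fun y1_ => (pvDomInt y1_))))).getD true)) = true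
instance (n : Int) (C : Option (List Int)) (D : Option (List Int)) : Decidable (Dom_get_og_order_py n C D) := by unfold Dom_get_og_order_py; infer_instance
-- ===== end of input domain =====

-- B replaces A's single accumulator pass by partitioning indices into member/non-member
-- lists and scattering ranks into a preallocated array (alternative decomposition, same cost).

-- ===== PORT A =====
def get_og_order_py (n : Int) (C : Option (List Int)) (D : Option (List Int)) : Option (List Int) :=
  match C, D with
  | none, none => none
  | none, some d =>
      -- order = []; c_len = n - len(D); c_ind = 0; for i in range(n): …
      let cLen : Int := n - (d.length : Int)
      let st := (PySem.List.pyRange 0 n 1).foldl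
        (fun (st : List Int × Int) i =>
          if d.contains i then (st.1 ++ [st.2 + cLen], st.2 + 1)
          else (st.1 ++ [i - st.2], st.2)) ([], 0)
      some st.1
  | some c, _ =>
      -- order = []; c_len = len(C); c_ind = 0; for i in range(n): …
      let cLen : Int := (c.length : Int)
      let st := (PySem.List.pyRange 0 n 1).foldl
        (fun (st : List Int × Int) i =>
          if c.contains i then (st.1 ++ [i - st.2], st.2)
          else (st.1 ++ [st.2 + cLen], st.2 + 1)) ([], 0)
      some st.1

-- ===== PORT B =====
-- _scatter(order, idxs, off): for rank, i in enumerate(idxs): order[i] = off + rank.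
-- Every i comes from range(n), so 0 ≤ i < len(order) and `List.set i.toNat` is exactly Python's order[i] = v.
def pvScatter (off : Int) (rank : Int) (idxs : List Int) (order : List Int) : List Int :=
  match idxs with
  | [] => order
  | i :: t => pvScatter off (rank + 1) t (order.set i.toNat (off + rank))

-- for i in range(n): (members if in_front(i) else nonmembers).append(i)
def pvPartition (inFront : Int → Bool) (idxs : List Int) (ms ns : List Int) : List Int × List Int :=
  match idxs with
  | [] => (ms, ns)
  | i :: t =>
      if inFront i then pvPartition inFront t (ms ++ [i]) ns
      else pvPartition inFront t ms (ns ++ [i])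

def get_og_order_py_alt (n : Int) (C : Option (List Int)) (D : Option (List Int)) : Option (List Int) :=
  match C, D with
  | none, none => none
  | none, some d =>
      let cLen : Int := n - (d.length : Int)
      let p := pvPartition (fun i => !d.contains i) (PySem.List.pyRange 0 n 1) [] []
      some (pvScatter cLen 0 p.2 (pvScatter 0 0 p.1 (List.replicate n.toNat 0)))
  | some c, _ =>
      let cLen : Int := (c.length : Int)
      let p := pvPartition (fun i => c.contains i) (PySem.List.pyRange 0 n 1) [] []
      some (pvScatter cLen 0 p.2 (pvScatter 0 0 p.1 (List.replicate n.toNat 0)))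

-- ===== PRECONDITION & SPEC =====
def Spec_get_og_order_py (n : Int) (C : Option (List Int)) (D : Option (List Int)) (out : Option (List Int)) : Prop := out = get_og_order_py_alt n C D
instance (n : Int) (C : Option (List Int)) (D : Option (List Int)) (out : Option (List Int)) : Decidable (Spec_get_og_order_py n C D out) := by unfold Spec_get_og_order_py; infer_instance

-- ===== CLAIM (what is proved, stated in full; the proofs are below) =====
def Claim_equal_get_og_order_py : Prop := ∀ (n : Int) (C : Option (List Int)) (D : Option (List Int)), Dom_get_og_order_py n C D → Spec_get_og_order_py n C D (get_og_order_py n C D)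

-- ===== LEMMAS AND PROOFS =====

-- the common value both programs place at position k
def pvG (pred : Int → Bool) (cLen : Int) (k : Nat) : Int :=
  if pred k then ((List.range k).countP (fun j : Nat => pred (j : Int)) : Int)
  else cLen + ((List.range k).countP (fun j : Nat => !pred (j : Int)) : Int)

lemma pv_count_split (p : Nat → Bool) (l : List Nat) :
    l.countP p + l.countP (fun a => !p a) = l.length := by
  induction l with
  | nil => simp
  | cons a t ih => cases h : p a <;> simp [h, ← ih] <;> omega

lemma pv_pyRange_cast (n : Int) :
    PySem.List.pyRange 0 n 1 = (List.range n.toNat).map (fun k : Nat => (k : Int)) := by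
  rw [PySem.List.pyRange_one]
  simp only [sub_zero, zero_add]

-- A's loop computes the map of pvG, its counter tracking non-members seen so far
lemma pvA_loop (pred : Int → Bool) (cLen : Int) (m : Nat) :
    ((List.range m).map (fun k : Nat => (k : Int))).foldl
      (fun (st : List Int × Int) i =>
        if pred i then (st.1 ++ [i - st.2], st.2) else (st.1 ++ [st.2 + cLen], st.2 + 1)) ([], 0)
    = ((List.range m).map (pvG pred cLen),
       (((List.range m).countP (fun j : Nat => !pred (j : Int))) : Int)) := by
  induction m with
  | zero => simp
  | succ m ih =>
      rw [List.range_succ, List.map_append, List.foldl_append, ih, List.map_append]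
      have hsplit := pv_count_split (fun j : Nat => pred (j : Int)) (List.range m)
      simp only [List.length_range] at hsplit
      cases h : pred (m : Int) with
      | true =>
          simp [pvG, h, List.countP_append, Prod.ext_iff]
          omega
      | false =>
          simp [pvG, h, List.countP_append, Prod.ext_iff]
          omega

lemma pvScatter_length (idxs : List Int) (off r : Int) (ord : List Int) :
    (pvScatter off r idxs ord).length = ord.length := by
  induction idxs generalizing r ord with
  | nil => rfl
  | cons i t ih => simp [pvScatter, ih]

lemma pvScatter_getD_notmem (xs : List Nat) (off r : Int) (ord : List Int) (k : Nat)
    (hk : k ∉ xs) :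
    (pvScatter off r (xs.map (fun j : Nat => (j : Int))) ord).getD k 0 = ord.getD k 0 := by
  induction xs generalizing r ord with
  | nil => rfl
  | cons a t ih =>
      simp only [List.mem_cons, not_or] at hk
      simp only [List.map_cons, pvScatter, Int.toNat_natCast]
      rw [ih _ _ hk.2]
      have hne : a ≠ k := hk.1 ∘ Eq.symm
      simp [List.getD_eq_getElem?_getD, List.getElem?_set_ne hne]

lemma pvScatter_getD_mem (B : List Nat) (off : Int) (k : Nat) (hB : k ∉ B) :
    ∀ (A : List Nat) (r : Int) (ord : List Int), k ∉ A → k < ord.length →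
      (pvScatter off r ((A ++ k :: B).map (fun j : Nat => (j : Int))) ord).getD k 0
        = off + r + A.length := by
  intro A
  induction A with
  | nil =>
      intro r ord _ hk
      simp only [List.nil_append, List.map_cons, pvScatter, Int.toNat_natCast]
      rw [pvScatter_getD_notmem _ _ _ _ _ hB]
      simp [List.getD_eq_getElem?_getD, hk]
  | cons a t ih =>
      intro r ord hA hk
      simp only [List.mem_cons, not_or] at hA
      simp only [List.cons_append, List.map_cons, pvScatter, Int.toNat_natCast]
      rw [ih (r + 1) _ hA.2 (by simpa using hk)]
      simp only [List.length_cons]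
      push_cast
      omega

lemma pvPartition_eq (inFront : Int → Bool) (idxs : List Int) :
    ∀ (ms ns : List Int), pvPartition inFront idxs ms ns
      = (ms ++ idxs.filter inFront, ns ++ idxs.filter (fun i => !inFront i)) := by
  induction idxs with
  | nil => intro ms ns; simp [pvPartition]
  | cons i t ih =>
      intro ms ns
      cases h : inFront i <;> simp [pvPartition, h, ih]

-- B's two scatters over the partitioned index lists also produce the map of pvG
lemma pvB_eq (pred : Int → Bool) (cLen : Int) (m : Nat) :
    pvScatter cLen 0 (((List.range m).map (fun k : Nat => (k : Int))).filter (fun i => !pred i))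
      (pvScatter 0 0 (((List.range m).map (fun k : Nat => (k : Int))).filter pred)
        (List.replicate m (0 : Int)))
    = (List.range m).map (pvG pred cLen) := by
  have hfilt : ∀ q : Int → Bool, ((List.range m).map (fun k : Nat => (k : Int))).filter q
      = ((List.range m).filter (fun j : Nat => q (j : Int))).map (fun j : Nat => (j : Int)) := by
    intro q
    rw [List.filter_map]
    rfl
  apply List.ext_getElem
  · simp [hfilt, pvScatter_length]
  · intro k hk1 hk2
    have hkm : k < m := by simpa [hfilt, pvScatter_length] using hk1
    have hlen1 : (pvScatter 0 0 (((List.range m).map (fun k : Nat => (k : Int))).filter pred)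
        (List.replicate m (0 : Int))).length = m := by simp [pvScatter_length]
    rw [← List.getD_eq_getElem _ 0 hk1, ← List.getD_eq_getElem _ 0 hk2]
    have hrhs : ((List.range m).map (pvG pred cLen)).getD k 0 = pvG pred cLen k := by
      rw [List.getD_eq_getElem _ 0 hk2]
      simp
    rw [hrhs, hfilt, hfilt]
    -- split range m around k
    have hm : m = (k + 1) + (m - (k + 1)) := by omega
    have hsplit : List.range m = (List.range k ++ [k]) ++
        (List.range (m - (k + 1))).map ((k + 1) + ·) := by
      conv_lhs => rw [hm]
      rw [List.range_add, List.range_succ]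
    have hnotlow : ∀ q : Nat → Bool, k ∉ (List.range k).filter q := by
      intro q h
      have := List.mem_range.mp (List.mem_of_mem_filter h)
      omega
    have hnothigh : ∀ q : Nat → Bool, k ∉ ((List.range (m - (k + 1))).map ((k + 1) + ·)).filter q := by
      intro q h
      obtain ⟨a, _, ha⟩ := List.mem_map.mp (List.mem_of_mem_filter h)
      omega
    cases h : pred (k : Int) with
    | true =>
        rw [pvScatter_getD_notmem]
        · -- the member scatter writes countP at k
          have : (List.range m).filter (fun j : Nat => pred (j : Int)) =
              ((List.range k).filter (fun j : Nat => pred (j : Int))) ++ k ::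
              (((List.range (m - (k + 1))).map ((k + 1) + ·)).filter (fun j : Nat => pred (j : Int))) := by
            rw [hsplit, List.filter_append, List.filter_append]
            simp [h]
          rw [this, pvScatter_getD_mem _ _ _ (hnothigh _) _ _ _ (hnotlow _) (by simpa using hkm)]
          simp [pvG, h, List.countP_eq_length_filter]
        · intro hmem
          have := List.of_mem_filter hmem
          simp [h] at this
    | false =>
        have : (List.range m).filter (fun j : Nat => !pred (j : Int)) =
            ((List.range k).filter (fun j : Nat => !pred (j : Int))) ++ k ::
            (((List.range (m - (k + 1))).map ((k + 1) + ·)).filter (fun j : Nat => !pred (j : Int))) := by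
          rw [hsplit, List.filter_append, List.filter_append]
          simp [h]
        rw [this, pvScatter_getD_mem _ _ _ (hnothigh _) _ _ _ (hnotlow _) (by simpa [pvScatter_length] using hkm)]
        simp [pvG, h, List.countP_eq_length_filter]

-- ===== VERDICT (by name: the statement is the Claim_ definition above) =====
theorem get_og_order_py_spec : Claim_equal_get_og_order_py := by
  intro n C D _hdom
  unfold Spec_get_og_order_py get_og_order_py get_og_order_py_alt
  cases C with
  | none =>
      cases D with
      | none => rfl
      | some d =>
          simp only
          rw [pv_pyRange_cast]
          have hfn : (fun (st : List Int × Int) i =>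
              if d.contains i then (st.1 ++ [st.2 + (n - (d.length : Int))], st.2 + 1)
              else (st.1 ++ [i - st.2], st.2))
            = (fun (st : List Int × Int) i =>
              if (!d.contains i) then (st.1 ++ [i - st.2], st.2)
              else (st.1 ++ [st.2 + (n - (d.length : Int))], st.2 + 1)) := by
            funext st i
            cases d.contains i <;> simp
          rw [hfn, pvA_loop (fun i => !d.contains i) (n - (d.length : Int)) n.toNat,
            pvPartition_eq, List.nil_append, List.nil_append,
            pvB_eq (fun i => !d.contains i) (n - (d.length : Int)) n.toNat]
  | some c =>
      cases D with
      | none =>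
          simp only
          rw [pv_pyRange_cast,
            pvA_loop (fun i => c.contains i) ((c.length : Int)) n.toNat,
            pvPartition_eq, List.nil_append, List.nil_append,
            pvB_eq (fun i => c.contains i) ((c.length : Int)) n.toNat]
      | some d =>
          simp only
          rw [pv_pyRange_cast,
            pvA_loop (fun i => c.contains i) ((c.length : Int)) n.toNat,
            pvPartition_eq, List.nil_append, List.nil_append,
            pvB_eq (fun i => c.contains i) ((c.length : Int)) n.toNat]
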